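-- pv_equiv track=rewrite | github.com/INSM-TUM-Teaching/business-process-redesign | change_operations/parallelize_operation.py | get_unique_elements_between_parallel_activities
-- ===== SOURCE A (Python) =====
-- from typing import List, Set, Tuple, Dict, Optional
--
-- def get_unique_elements_between_parallel_activities(variants: List[List[str]], parallel_activities: Set[str]) -> List[str]:
--     """
--     Extracts all unique elements that occur between any two parallelized activities across multiple variants.
--
--     Args:
--         variants: A list of variants, each being a list of activity names.
--         parallelize_activities: A set of activity names considered for parallelizing.
--
--     Returns:
--         A list of unique activity names that are strictly between two consecutive parallelize activities.
--     """
--     elements_in_between = []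
--
--     for variant in variants:
--         # Find indexes of collapse activities in this variant
--         parallel_indexes = [i for i, activity in enumerate(variant) if activity in parallel_activities]
--         parallel_indexes.sort()
--
--         for i in range(len(parallel_indexes) - 1):
--             start = parallel_indexes[i]
--             end = parallel_indexes[i + 1]
--             # Add elements between start and end
--             for elem in variant[start + 1:end]:
--                 if elem not in parallel_activities and elem not in elements_in_between:
--                     elements_in_between.append(elem)
--
--     return elements_in_between
-- ===== SOURCE B (Python) =====
-- def get_unique_elements_between_parallel_activities(variants, parallel_activities):
--     """Single forward pass per variant: buffer activities and flush the buffer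
--     into the result (deduplicated, first-seen order) each time a parallel
--     activity is met after a previous one."""
--     result = []
--     for variant in variants:
--         buffer = []
--         seen_parallel = False
--         for activity in variant:
--             if activity in parallel_activities:
--                 if seen_parallel:
--                     for elem in buffer:
--                         if elem not in result:
--                             result.append(elem)
--                 buffer = []
--                 seen_parallel = True
--             else:
--                 buffer.append(activity)
--     return result
-- ===== Notes on version B (the rewrite author's own statement) =====
-- stated objective: simpler
-- what changed: Replaced the index-list + sort + nested consecutive-pair slicing with a single forward pass per variant that keeps a running buffer and a seen_parallel flag, flushing the deduplicated buffer at each subsequent parallel activity.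
import Mathlib
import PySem

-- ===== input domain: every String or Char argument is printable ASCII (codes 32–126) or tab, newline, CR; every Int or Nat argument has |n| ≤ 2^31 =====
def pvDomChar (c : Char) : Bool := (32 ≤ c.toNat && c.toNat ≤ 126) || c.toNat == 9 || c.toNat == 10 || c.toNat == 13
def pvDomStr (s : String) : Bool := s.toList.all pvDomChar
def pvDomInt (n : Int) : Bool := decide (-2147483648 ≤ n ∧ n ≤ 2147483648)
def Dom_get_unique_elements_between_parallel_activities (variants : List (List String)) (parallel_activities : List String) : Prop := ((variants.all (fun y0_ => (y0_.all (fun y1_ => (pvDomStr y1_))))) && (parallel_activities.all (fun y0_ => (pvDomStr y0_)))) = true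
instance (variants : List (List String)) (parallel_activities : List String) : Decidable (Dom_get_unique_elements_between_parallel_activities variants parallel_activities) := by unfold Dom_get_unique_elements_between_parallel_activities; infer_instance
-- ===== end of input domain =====

-- B replaces A's index-list/sort/consecutive-pair slicing with a one-pass buffer+flag state machine per variant (objective: simpler).

-- ===== PORT A =====
def get_unique_elements_between_parallel_activities (variants : List (List String)) (parallel_activities : List String) : List String :=
  variants.foldl (fun elements_in_between variant =>
    let parallel_indexes : List Int :=
      ((PySem.List.enumerate variant 0).filter (fun p => parallel_activities.contains p.2)).map (fun p => p.1)
    let parallel_indexes := PySem.List.sorted parallel_indexes (fun x => x) false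
    (PySem.List.pyRange 0 ((parallel_indexes.length : Int) - 1) 1).foldl (fun acc i =>
      let start := PySem.List.pyGetD parallel_indexes i 0
      let stop  := PySem.List.pyGetD parallel_indexes (i + 1) 0
      (PySem.List.slice variant (some (start + 1)) (some stop)).foldl (fun acc2 elem =>
        if !parallel_activities.contains elem && !acc2.contains elem then acc2 ++ [elem] else acc2) acc)
      elements_in_between) []

-- ===== PORT B =====
def get_unique_elements_between_parallel_activities_alt (variants : List (List String)) (parallel_activities : List String) : List String :=
  variants.foldl (fun result variant =>
    (variant.foldl (fun (st : List String × List String × Bool) activity =>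
      if parallel_activities.contains activity then
        ((if st.2.2 then
            st.2.1.foldl (fun r e => if !r.contains e then r ++ [e] else r) st.1
          else st.1), [], true)
      else (st.1, st.2.1 ++ [activity], st.2.2)) (result, ([], false))).1) []

-- ===== PRECONDITION & SPEC =====
def Spec_get_unique_elements_between_parallel_activities (variants : List (List String)) (parallel_activities : List String) (out : List String) : Prop := out = get_unique_elements_between_parallel_activities_alt variants parallel_activities
instance (variants : List (List String)) (parallel_activities : List String) (out : List String) : Decidable (Spec_get_unique_elements_between_parallel_activities variants parallel_activities out) := by unfold Spec_get_unique_elements_between_parallel_activities; infer_instance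

-- ===== CLAIM (what is proved, stated in full; the proofs are below) =====
def Claim_equal_get_unique_elements_between_parallel_activities : Prop := ∀ (variants : List (List String)) (parallel_activities : List String), Dom_get_unique_elements_between_parallel_activities variants parallel_activities → Spec_get_unique_elements_between_parallel_activities variants parallel_activities (get_unique_elements_between_parallel_activities variants parallel_activities)

-- ===== LEMMAS AND PROOFS =====

-- the non-parallel elements, after a parallel element has been seen, that are followed by another parallel element
def pvRun (pa : List String) : List String → List String
  | [] => []
  | x :: t => if x ∈ pa then pvRun pa t
              else if ∃ e ∈ t, e ∈ pa then x :: pvRun pa t else []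

-- the non-parallel elements strictly between the first and last parallel element of a variant
def pvMid (pa : List String) : List String → List String
  | [] => []
  | x :: t => if x ∈ pa then pvRun pa t else pvMid pa t

-- positions of the parallel elements, increasing
def pvIdxs (pa : List String) : List String → List Nat
  | [] => []
  | x :: t => if x ∈ pa then 0 :: (pvIdxs pa t).map (· + 1) else (pvIdxs pa t).map (· + 1)

def pvSliceN (xs : List String) (a b : Nat) : List String := (xs.drop a).take (b - a)

-- concatenation of the slices between consecutive index pairs
def pvPc (xs : List String) : List Nat → List String
  | [] => []
  | [_] => []
  | a :: b :: l => pvSliceN xs (a + 1) b ++ pvPc xs (b :: l)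

def pvAddU (r : List String) (e : String) : List String := if !r.contains e then r ++ [e] else r
def pvAddU2 (pa r : List String) (e : String) : List String :=
  if !pa.contains e && !r.contains e then r ++ [e] else r

theorem pvRun_nil_of_no_par (pa : List String) (xs : List String) (h : ∀ e ∈ xs, e ∉ pa) :
    pvRun pa xs = [] := by
  induction xs with
  | nil => rfl
  | cons x t ih =>
    have h1 : x ∉ pa := h x (by simp)
    have h2 : ¬ ∃ e ∈ t, e ∈ pa := by
      rintro ⟨e, he, hep⟩; exact h e (by simp [he]) hep
    simp [pvRun, h1, h2]

theorem pvIdxs_nil_iff (pa : List String) (xs : List String) :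
    pvIdxs pa xs = [] ↔ ∀ e ∈ xs, e ∉ pa := by
  induction xs with
  | nil => simp [pvIdxs]
  | cons x t ih =>
    by_cases h : x ∈ pa
    · simp [pvIdxs, h]
    · simp [pvIdxs, h, ih]

theorem pvIdxs_pairwise (pa : List String) (xs : List String) :
    (pvIdxs pa xs).Pairwise (fun a b => a < b) := by
  induction xs with
  | nil => simp [pvIdxs]
  | cons x t ih =>
    have hmap : ((pvIdxs pa t).map (· + 1)).Pairwise (fun a b => a < b) :=
      List.Pairwise.map _ (by omega) ih
    by_cases h : x ∈ pa
    · simp only [pvIdxs, h, if_pos]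
      refine List.pairwise_cons.mpr ⟨?_, hmap⟩
      intro n hn
      simp only [List.mem_map] at hn
      obtain ⟨m, _, rfl⟩ := hn; omega
    · simp [pvIdxs, h, hmap]

-- shift lemma: indexes shifted by one over a cons
theorem pvPc_shift (x : String) (xs : List String) (l : List Nat) :
    pvPc (x :: xs) (l.map (· + 1)) = pvPc xs l := by
  induction l with
  | nil => rfl
  | cons a l ih =>
    cases l with
    | nil => rfl
    | cons b l' =>
      simp only [List.map_cons] at ih ⊢
      simp only [pvPc]
      rw [ih]
      congr 1
      simp only [pvSliceN, List.drop_succ_cons]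
      congr 1
      omega

def pvAnch (pa : List String) (xs : List String) : List String :=
  match pvIdxs pa xs with
  | [] => []
  | j :: l' => xs.take j ++ pvPc xs (j :: l')

theorem pvAnch_eq_run (pa : List String) (xs : List String) : pvAnch pa xs = pvRun pa xs := by
  induction xs with
  | nil => rfl
  | cons x t ih =>
    by_cases h : x ∈ pa
    · rcases hl : pvIdxs pa t with _ | ⟨j, l'⟩
      · have hno : ∀ e ∈ t, e ∉ pa := (pvIdxs_nil_iff pa t).mp hl
        simp [pvAnch, pvIdxs, h, hl, pvPc, pvRun, pvRun_nil_of_no_par pa t hno]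
      · have hA : pvAnch pa (x :: t) = t.take j ++ pvPc t (j :: l') := by
          simp only [pvAnch, pvIdxs, h, if_pos, hl, List.map_cons]
          simp only [pvPc, List.take_zero, List.nil_append]
          have h1 : pvSliceN (x :: t) (0 + 1) (j + 1) = t.take j := by
            simp [pvSliceN]
          have h2 : pvPc (x :: t) ((j + 1) :: l'.map (· + 1)) = pvPc t (j :: l') := by
            have := pvPc_shift x t (j :: l')
            simpa using this
          rw [h1, h2]
        have hA' : pvAnch pa t = t.take j ++ pvPc t (j :: l') := by simp [pvAnch, hl]
        rw [hA, ← hA', ih]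
        simp [pvRun, h]
    · rcases hl : pvIdxs pa t with _ | ⟨j, l'⟩
      · have hno : ∀ e ∈ t, e ∉ pa := (pvIdxs_nil_iff pa t).mp hl
        have h2 : ¬ ∃ e ∈ t, e ∈ pa := by
          rintro ⟨e, he, hep⟩; exact hno e he hep
        simp [pvAnch, pvIdxs, h, hl, pvRun, h2]
      · have hany : ∃ e ∈ t, e ∈ pa := by
          by_contra hc
          have hno : ∀ e ∈ t, e ∉ pa := by
            intro e he hep; exact hc ⟨e, he, hep⟩
          rw [(pvIdxs_nil_iff pa t).mpr hno] at hl; cases hl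
        have hA : pvAnch pa (x :: t) = x :: (t.take j ++ pvPc t (j :: l')) := by
          simp only [pvAnch, pvIdxs, h, if_false, hl, List.map_cons]
          simp only [List.take_succ_cons, List.cons_append]
          congr 2
          have := pvPc_shift x t (j :: l')
          simpa using this
        have hA' : pvAnch pa t = t.take j ++ pvPc t (j :: l') := by simp [pvAnch, hl]
        rw [hA, ← hA', ih]
        simp [pvRun, h, hany]

theorem pvPc_idxs_eq_mid (pa : List String) (xs : List String) :
    pvPc xs (pvIdxs pa xs) = pvMid pa xs := by
  induction xs with
  | nil => rfl
  | cons x t ih =>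
    by_cases h : x ∈ pa
    · rcases hl : pvIdxs pa t with _ | ⟨j, l'⟩
      · have hno : ∀ e ∈ t, e ∉ pa := (pvIdxs_nil_iff pa t).mp hl
        simp [pvIdxs, h, hl, pvPc, pvMid, pvRun_nil_of_no_par pa t hno]
      · simp only [pvIdxs, h, if_pos, hl, List.map_cons, pvMid]
        simp only [pvPc]
        have h1 : pvSliceN (x :: t) (0 + 1) (j + 1) = t.take j := by simp [pvSliceN]
        have h2 : pvPc (x :: t) ((j + 1) :: l'.map (· + 1)) = pvPc t (j :: l') := by
          have := pvPc_shift x t (j :: l'); simpa using this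
        rw [h1, h2]
        have h3 : pvAnch pa t = t.take j ++ pvPc t (j :: l') := by simp [pvAnch, hl]
        rw [← h3, pvAnch_eq_run]
    · simp only [pvIdxs, h, if_false, pvMid]
      rw [pvPc_shift, ih]

-- elements of pvRun / pvMid are never parallel
theorem pvRun_not_par (pa : List String) (xs : List String) :
    ∀ e ∈ pvRun pa xs, e ∉ pa := by
  induction xs with
  | nil => intro e he; cases he
  | cons x t ih =>
    intro e he
    by_cases h : x ∈ pa
    · simp only [pvRun, h, if_pos] at he; exact ih e he
    · simp only [pvRun, h, if_false] at he
      by_cases ha : ∃ e ∈ t, e ∈ pa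
      · simp only [ha, if_pos, List.mem_cons] at he
        rcases he with rfl | he
        · exact h
        · exact ih e he
      · simp [ha] at he

theorem pvMid_not_par (pa : List String) (xs : List String) :
    ∀ e ∈ pvMid pa xs, e ∉ pa := by
  induction xs with
  | nil => intro e he; cases he
  | cons x t ih =>
    intro e he
    by_cases h : x ∈ pa
    · simp only [pvMid, h, if_pos] at he; exact pvRun_not_par pa t e he
    · simp only [pvMid, h, if_false] at he
      exact ih e he

-- ========== A side ==========

theorem pvJ_gen (pa : List String) (v : List String) : ∀ s : Int,
    ((PySem.List.enumerate v s).filter (fun p => pa.contains p.2)).map (fun p => p.1)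
      = (pvIdxs pa v).map (fun n : Nat => s + (n : Int)) := by
  induction v with
  | nil => intro s; simp [PySem.List.enumerate_nil, pvIdxs]
  | cons x t ih =>
    intro s
    rw [PySem.List.enumerate_cons]
    by_cases h : x ∈ pa
    · have hb : pa.contains x = true := by simpa using h
      simp only [pvIdxs, h, if_pos, List.filter_cons, hb, List.map_cons]
      rw [ih (s + 1), List.map_map]
      refine congrArg₂ List.cons (by omega) ?_
      apply List.map_congr_left
      intro n _
      simp only [Function.comp_apply]
      push_cast
      omega
    · have hb : pa.contains x = false := by simpa using h
      simp only [pvIdxs, h, if_false, List.filter_cons, hb]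
      rw [if_neg (by simp), ih (s + 1), List.map_map]
      apply List.map_congr_left
      intro n _
      simp only [Function.comp_apply]
      push_cast
      omega

-- generic consecutive-pair loop reduction (Nat indexes, getD)
theorem pvRangePairs {β : Type} (g : β → Nat → Nat → β) :
    ∀ (l : List Nat) (init : β),
    (List.range (l.length - 1)).foldl (fun acc k => g acc (l.getD k 0) (l.getD (k + 1) 0)) init
      = (l.zip l.tail).foldl (fun acc p => g acc p.1 p.2) init := by
  intro l
  induction l with
  | nil => intro init; simp
  | cons a t ih =>
    cases t with
    | nil => intro init; simp
    | cons b t' =>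
      intro init
      have hlen : (a :: b :: t').length - 1 = ((b :: t').length - 1) + 1 := by simp
      rw [hlen, List.range_succ_eq_map]
      simp only [List.foldl_cons, List.foldl_map, List.getD_cons_zero, List.getD_cons_succ]
      have ih' := ih (g init a b)
      simp only [List.getD_cons_succ] at ih'
      rw [ih']
      rfl

theorem pvFoldl_flat {α β : Type} (f : β → α → β) (g : Nat × Nat → List α) :
    ∀ (pl : List (Nat × Nat)) (init : β),
    pl.foldl (fun acc p => (g p).foldl f acc) init = (pl.flatMap g).foldl f init := by
  intro pl
  induction pl with
  | nil => intro init; rfl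
  | cons p pl ih => intro init; simp [List.flatMap_cons, List.foldl_append, ih]

theorem pvPc_eq_flatMap (v : List String) : ∀ l : List Nat,
    pvPc v l = (l.zip l.tail).flatMap (fun p => pvSliceN v (p.1 + 1) p.2) := by
  intro l
  induction l with
  | nil => rfl
  | cons a l ih =>
    cases l with
    | nil => rfl
    | cons b l' =>
      simp only [pvPc, List.tail_cons, List.zip_cons_cons, List.flatMap_cons]
      rw [ih]
      rfl

-- A's per-variant body computes foldl pvAddU2 over pvMid
theorem pvMid_nil_of_no_par (pa : List String) (xs : List String) (h : ∀ e ∈ xs, e ∉ pa) :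
    pvMid pa xs = [] := by
  induction xs with
  | nil => rfl
  | cons x t ih =>
    have h1 : x ∉ pa := h x (by simp)
    simp [pvMid, h1, ih (fun e he => h e (by simp [he]))]

-- A's per-variant body computes foldl pvAddU2 over pvMid
theorem pvA_inner (pa : List String) (v : List String) (ein : List String) :
    (PySem.List.pyRange 0 (((PySem.List.sorted (((PySem.List.enumerate v 0).filter (fun p => pa.contains p.2)).map (fun p => p.1)) (fun x => x) false).length : Int) - 1) 1).foldl (fun acc i =>
      (PySem.List.slice v (some ((PySem.List.pyGetD (PySem.List.sorted (((PySem.List.enumerate v 0).filter (fun p => pa.contains p.2)).map (fun p => p.1)) (fun x => x) false) i 0) + 1)) (some (PySem.List.pyGetD (PySem.List.sorted (((PySem.List.enumerate v 0).filter (fun p => pa.contains p.2)).map (fun p => p.1)) (fun x => x) false) (i + 1) 0))).foldl (fun acc2 elem =>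
        if !pa.contains elem && !acc2.contains elem then acc2 ++ [elem] else acc2) acc) ein
      = (pvMid pa v).foldl (pvAddU2 pa) ein := by
  have hJ : (((PySem.List.enumerate v 0).filter (fun p => pa.contains p.2)).map (fun p => p.1))
      = (pvIdxs pa v).map (fun n : Nat => (n : Int)) := by
    rw [pvJ_gen pa v 0]
    apply List.map_congr_left
    intro n _
    omega
  have hpw : ((pvIdxs pa v).map (fun n : Nat => (n : Int))).Pairwise (fun a b => a < b) := by
    refine List.Pairwise.map _ ?_ (pvIdxs_pairwise pa v)
    intro a b hab; exact_mod_cast hab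
  have hsorted : PySem.List.sorted ((pvIdxs pa v).map (fun n : Nat => (n : Int))) (fun x => x) false
      = (pvIdxs pa v).map (fun n : Nat => (n : Int)) := by
    apply PySem.List.sorted_eq_of_perm_of_pairwise_lt
    · exact List.Perm.refl _
    · exact hpw
  rw [hJ, hsorted]
  rcases hcase : pvIdxs pa v with _ | ⟨a0, t0⟩
  · have hno : ∀ e ∈ v, e ∉ pa := (pvIdxs_nil_iff pa v).mp hcase
    rw [pvMid_nil_of_no_par pa v hno]
    simp [PySem.List.pyRange_one_eq_nil]
  · rw [← hcase]
    have hlen : ((((pvIdxs pa v).map (fun n : Nat => (n : Int))).length : Int) - 1)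
        = (((pvIdxs pa v).length - 1 : Nat) : Int) := by
      rw [hcase]; simp
    rw [hlen, PySem.List.pyRange_one]
    have htn : (((((pvIdxs pa v).length - 1 : Nat) : Int)) - 0).toNat = (pvIdxs pa v).length - 1 := by
      omega
    rw [htn]
    simp only [List.foldl_map]
    have hstep : ∀ (acc : List String), ∀ k ∈ List.range ((pvIdxs pa v).length - 1),
        (PySem.List.slice v (some ((PySem.List.pyGetD ((pvIdxs pa v).map (fun n : Nat => (n : Int))) ((0:Int) + (k:Int)) 0) + 1)) (some (PySem.List.pyGetD ((pvIdxs pa v).map (fun n : Nat => (n : Int))) (((0:Int) + (k:Int)) + 1) 0))).foldl (fun acc2 elem =>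
          if !pa.contains elem && !acc2.contains elem then acc2 ++ [elem] else acc2) acc
        = (pvSliceN v (((pvIdxs pa v).getD k 0) + 1) ((pvIdxs pa v).getD (k + 1) 0)).foldl (pvAddU2 pa) acc := by
      intro acc k _
      have hg : ∀ m : Nat, PySem.List.pyGetD ((pvIdxs pa v).map (fun n : Nat => (n : Int))) ((m : Nat) : Int) 0
          = (((pvIdxs pa v).getD m 0 : Nat) : Int) := by
        intro m
        rw [PySem.List.pyGetD_natCast]
        rcases hx : (pvIdxs pa v)[m]? with _ | n
        · simp [List.getD, hx]
        · simp [List.getD, hx]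
      have e1 : ((0:Int) + (k:Int)) = ((k : Nat) : Int) := by omega
      rw [e1]
      have e2 : ((k : Int) + 1) = ((k + 1 : Nat) : Int) := by push_cast; omega
      rw [e2, hg k, hg (k + 1)]
      have hcast : (((pvIdxs pa v).getD k 0 : Nat) : Int) + 1 = ((((pvIdxs pa v).getD k 0) + 1 : Nat) : Int) := by
        push_cast; omega
      rw [hcast, PySem.List.slice_natCast]
      rfl
    refine Eq.trans (PySem.List.foldl_congr_mem _ _
      (fun acc k => (pvSliceN v (((pvIdxs pa v).getD k 0) + 1) ((pvIdxs pa v).getD (k + 1) 0)).foldl (pvAddU2 pa) acc)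
      _ hstep) ?_
    rw [pvRangePairs (fun acc a b => (pvSliceN v (a + 1) b).foldl (pvAddU2 pa) acc)]
    rw [pvFoldl_flat (pvAddU2 pa) (fun p => pvSliceN v (p.1 + 1) p.2)]
    rw [← pvPc_eq_flatMap, pvPc_idxs_eq_mid]

-- ========== B side ==========

theorem pvB_true (pa : List String) : ∀ (xs : List String) (res buf : List String),
    ((xs.foldl (fun (st : List String × List String × Bool) activity =>
      if pa.contains activity then
        ((if st.2.2 then st.2.1.foldl pvAddU st.1 else st.1), [], true)
      else (st.1, st.2.1 ++ [activity], st.2.2)) (res, (buf, true))).1)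
      = if ∃ e ∈ xs, e ∈ pa then (buf ++ pvRun pa xs).foldl pvAddU res else res := by
  intro xs
  induction xs with
  | nil => intro res buf; simp
  | cons x t ih =>
    intro res buf
    by_cases h : x ∈ pa
    · have hb : pa.contains x = true := by simpa using h
      have hex : ∃ e ∈ x :: t, e ∈ pa := ⟨x, by simp, h⟩
      simp only [List.foldl_cons, hb, if_pos, hex]
      rw [ih]
      have hrun : pvRun pa (x :: t) = pvRun pa t := by simp [pvRun, h]
      by_cases ha : ∃ e ∈ t, e ∈ pa
      · simp only [ha, if_pos]
        rw [hrun, List.foldl_append]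
        simp
      · simp only [ha, if_false]
        rw [hrun, pvRun_nil_of_no_par pa t (by intro e he hep; exact ha ⟨e, he, hep⟩),
          List.append_nil]
    · have hb : pa.contains x = false := by simpa using h
      simp only [List.foldl_cons, hb, Bool.false_eq_true, if_false]
      rw [ih]
      have hiff : (∃ e ∈ x :: t, e ∈ pa) ↔ (∃ e ∈ t, e ∈ pa) := by
        constructor
        · rintro ⟨e, he, hep⟩
          rcases List.mem_cons.mp he with rfl | he'
          · exact absurd hep h
          · exact ⟨e, he', hep⟩
        · rintro ⟨e, he, hep⟩; exact ⟨e, by simp [he], hep⟩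
      by_cases ha : ∃ e ∈ t, e ∈ pa
      · simp only [ha, if_pos, hiff.mpr ha, if_pos]
        have hrun : pvRun pa (x :: t) = x :: pvRun pa t := by simp [pvRun, h, ha]
        rw [hrun]
        simp
      · rw [if_neg ha, if_neg (fun hx => ha (hiff.mp hx))]

theorem pvB_false (pa : List String) : ∀ (xs : List String) (res buf : List String),
    ((xs.foldl (fun (st : List String × List String × Bool) activity =>
      if pa.contains activity then
        ((if st.2.2 then st.2.1.foldl pvAddU st.1 else st.1), [], true)
      else (st.1, st.2.1 ++ [activity], st.2.2)) (res, (buf, false))).1)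
      = (pvMid pa xs).foldl pvAddU res := by
  intro xs
  induction xs with
  | nil => intro res buf; simp [pvMid]
  | cons x t ih =>
    intro res buf
    by_cases h : x ∈ pa
    · have hb : pa.contains x = true := by simpa using h
      simp only [List.foldl_cons, hb, if_pos, Bool.false_eq_true, if_false]
      rw [pvB_true]
      have hm : pvMid pa (x :: t) = pvRun pa t := by simp [pvMid, h]
      rw [hm]
      by_cases ha : ∃ e ∈ t, e ∈ pa
      · simp [ha]
      · rw [if_neg ha, pvRun_nil_of_no_par pa t (by intro e he hep; exact ha ⟨e, he, hep⟩)]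
        simp
    · have hb : pa.contains x = false := by simpa using h
      simp only [List.foldl_cons, hb, Bool.false_eq_true, if_false]
      rw [ih]
      simp [pvMid, h]

-- ========== main theorem ==========

theorem pvMain (variants : List (List String)) (pa : List String) :
    get_unique_elements_between_parallel_activities variants pa
      = get_unique_elements_between_parallel_activities_alt variants pa := by
  unfold get_unique_elements_between_parallel_activities get_unique_elements_between_parallel_activities_alt
  rw [show (fun (r : List String) (e : String) => if !r.contains e then r ++ [e] else r) = pvAddU from rfl]
  apply PySem.List.foldl_congr_mem
  intro acc v _
  simp only
  rw [pvA_inner pa v acc, pvB_false pa v acc []]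
  apply PySem.List.foldl_congr_mem
  intro r e he
  have hnp : e ∉ pa := pvMid_not_par pa v e he
  by_cases hr : e ∈ r <;> simp [pvAddU, pvAddU2, hr, hnp]

-- ===== VERDICT (by name: the statement is the Claim_ definition above) =====
theorem get_unique_elements_between_parallel_activities_spec : Claim_equal_get_unique_elements_between_parallel_activities := by
  intro variants pa _
  unfold Spec_get_unique_elements_between_parallel_activities
  exact pvMain variants pa
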